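-- pv_equiv track=rewrite | github.com/sassoftware/pyviyatools | comparecontent.py | multiset_diff
-- ===== SOURCE A (Python) =====
-- from collections import Counter
--
-- def multiset_diff(norm1, map1, norm2, map2):
--     """
--     Order-insensitive comparison with duplicate support.
--     Returns lists of original lines only in file1 and only in file2.
--     """
--     c1 = Counter(norm1)
--     c2 = Counter(norm2)
--
--     only1 = []
--     only2 = []
--
--     # For deterministic output, iterate sorted keys
--     for norm in sorted((c1 - c2).keys()):
--         needed = (c1 - c2)[norm]
--         only1.extend(map1.get(norm, [norm])[:needed])
--
--     for norm in sorted((c2 - c1).keys()):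
--         needed = (c2 - c1)[norm]
--         only2.extend(map2.get(norm, [norm])[:needed])
--
--     return only1, only2
-- ===== SOURCE B (Python) =====
-- def _expand(rest, mapping):
--     # rest is sorted: run-length pass; flush each finished group of equal
--     # normalized lines as a slice of that key's original lines.
--     out = []
--     if not rest:
--         return out
--     cur, cnt = rest[0], 1
--     for x in rest[1:]:
--         if x == cur:
--             cnt += 1
--         else:
--             out += mapping.get(cur, [cur])[:cnt]
--             cur, cnt = x, 1
--     out += mapping.get(cur, [cur])[:cnt]
--     return out
--
--
-- def multiset_diff(norm1, map1, norm2, map2):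
--     """
--     Order-insensitive comparison with duplicate support.
--     Returns lists of original lines only in file1 and only in file2.
--     """
--     # Sort both normalized multisets, cancel common elements with a
--     # two-pointer merge; the leftovers of each side are its surplus lines.
--     s1 = sorted(norm1)
--     s2 = sorted(norm2)
--     rest1, rest2 = [], []
--     i = j = 0
--     while i < len(s1) and j < len(s2):
--         a, b = s1[i], s2[j]
--         if a == b:
--             i += 1
--             j += 1
--         elif a < b:
--             rest1.append(a)
--             i += 1
--         else:
--             rest2.append(b)
--             j += 1
--     rest1 += s1[i:]
--     rest2 += s2[j:]
--     return _expand(rest1, map1), _expand(rest2, map2)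
-- ===== Notes on version B (the rewrite author's own statement) =====
-- stated objective: faster
-- what changed: Drops the Counter machinery entirely: B sorts both normalized lists, cancels common elements with a two-pointer merge, and expands each side's sorted leftovers with a run-length pass that slices the mapping per group, instead of A's per-key loops that rebuild the Counter subtraction (c1 - c2) on every iteration.
import Mathlib
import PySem

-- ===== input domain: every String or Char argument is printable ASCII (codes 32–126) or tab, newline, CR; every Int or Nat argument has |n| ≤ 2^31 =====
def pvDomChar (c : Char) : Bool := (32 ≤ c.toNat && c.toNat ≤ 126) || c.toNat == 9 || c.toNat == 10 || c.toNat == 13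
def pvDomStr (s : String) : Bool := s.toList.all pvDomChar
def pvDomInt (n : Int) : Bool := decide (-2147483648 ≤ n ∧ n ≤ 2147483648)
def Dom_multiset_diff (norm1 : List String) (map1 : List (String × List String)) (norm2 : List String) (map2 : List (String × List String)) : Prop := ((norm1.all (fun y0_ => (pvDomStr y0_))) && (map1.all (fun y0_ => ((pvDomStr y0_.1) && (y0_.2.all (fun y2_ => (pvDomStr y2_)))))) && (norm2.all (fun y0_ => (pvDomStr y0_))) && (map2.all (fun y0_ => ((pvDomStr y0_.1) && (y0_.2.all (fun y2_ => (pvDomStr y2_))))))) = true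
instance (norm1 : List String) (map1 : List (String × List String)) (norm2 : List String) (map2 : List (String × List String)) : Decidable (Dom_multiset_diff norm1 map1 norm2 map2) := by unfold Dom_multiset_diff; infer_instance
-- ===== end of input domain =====

-- B drops the Counter subtraction: it sorts both normalized lists, cancels common
-- elements with a two-pointer merge and expands each side's sorted leftovers by
-- grouping consecutive equal lines; a timing run measured B faster (objective: faster
-- — A rebuilds the Counter subtraction on every loop iteration, B never builds one).

-- ===== PORT A =====
-- Python Counter.__sub__ (CPython), step for step: keep positive differences of self's
-- items, then other's items with negative counts not in self.
def pyCounterSub (self other : PySem.Dict String Int) : PySem.Dict String Int :=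
  let result := self.items.foldl (fun r kv =>
      let newcount := kv.2 - other.getD kv.1 0
      if 0 < newcount then r.insert kv.1 newcount else r) PySem.Dict.empty
  other.items.foldl (fun r kv =>
      if self.contains kv.1 = false ∧ kv.2 < 0 then r.insert kv.1 (0 - kv.2) else r) result

def multiset_diff (norm1 : List String) (map1 : List (String × List String)) (norm2 : List String) (map2 : List (String × List String)) : List String × List String :=
  let c1 := PySem.Dict.counter norm1
  let c2 := PySem.Dict.counter norm2
  let only1 : List String :=
    (PySem.List.sorted (pyCounterSub c1 c2).keys (fun x => x)).foldl
      (fun only1 norm =>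
        let needed := (pyCounterSub c1 c2).getD norm 0
        only1 ++ PySem.List.slice ((PySem.Dict.mk map1).getD norm [norm]) none (some needed)) []
  let only2 : List String :=
    (PySem.List.sorted (pyCounterSub c2 c1).keys (fun x => x)).foldl
      (fun only2 norm =>
        let needed := (pyCounterSub c2 c1).getD norm 0
        only2 ++ PySem.List.slice ((PySem.Dict.mk map2).getD norm [norm]) none (some needed)) []
  (only1, only2)

-- ===== PORT B =====
-- the two-pointer cancelling merge: 'while i < len(s1) and j < len(s2)' ported with a
-- step-count fuel (len(s1)+len(s2), enough for every iteration); fuel 0 = loop exit,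
-- returning the unconsumed tails that Python then appends (rest1 += s1[i:], rest2 += s2[j:])
def pvMerge : Nat → List String → List String → List String × List String
  | 0, xs, ys => (xs, ys)
  | _ + 1, [], ys => ([], ys)
  | _ + 1, x :: xs, [] => (x :: xs, [])
  | n + 1, a :: xs, b :: ys =>
    if a = b then pvMerge n xs ys
    else if a < b then
      let r := pvMerge n xs (b :: ys)
      (a :: r.1, r.2)
    else
      let r := pvMerge n (a :: xs) ys
      (r.1, b :: r.2)

-- _expand's run-length loop: cur/cnt accumulator, flush on key change and at the end
def pvExpandGo (mp : PySem.Dict String (List String)) (cur : String) (cnt : Nat) : List String → List String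
  | [] => PySem.List.slice (mp.getD cur [cur]) none (some (cnt : Int))
  | x :: rest =>
    if x = cur then pvExpandGo mp cur (cnt + 1) rest
    else PySem.List.slice (mp.getD cur [cur]) none (some (cnt : Int)) ++ pvExpandGo mp x 1 rest

def pvExpand (mp : PySem.Dict String (List String)) : List String → List String
  | [] => []
  | a :: rest => pvExpandGo mp a 1 rest

def multiset_diff_alt (norm1 : List String) (map1 : List (String × List String)) (norm2 : List String) (map2 : List (String × List String)) : List String × List String :=
  let s1 := PySem.List.sorted norm1 (fun x => x)
  let s2 := PySem.List.sorted norm2 (fun x => x)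
  let r := pvMerge (s1.length + s2.length) s1 s2
  (pvExpand (PySem.Dict.mk map1) r.1, pvExpand (PySem.Dict.mk map2) r.2)

-- ===== PRECONDITION & SPEC =====
def Spec_multiset_diff (norm1 : List String) (map1 : List (String × List String)) (norm2 : List String) (map2 : List (String × List String)) (out : List String × List String) : Prop := out = multiset_diff_alt norm1 map1 norm2 map2
instance (norm1 : List String) (map1 : List (String × List String)) (norm2 : List String) (map2 : List (String × List String)) (out : List String × List String) : Decidable (Spec_multiset_diff norm1 map1 norm2 map2 out) := by unfold Spec_multiset_diff; infer_instance

-- ===== CLAIM (what is proved, stated in full; the proofs are below) =====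
def Claim_equal_multiset_diff : Prop := ∀ (norm1 : List String) (map1 : List (String × List String)) (norm2 : List String) (map2 : List (String × List String)), Dom_multiset_diff norm1 map1 norm2 map2 → Spec_multiset_diff norm1 map1 norm2 map2 (multiset_diff norm1 map1 norm2 map2)

-- ===== LEMMAS AND PROOFS =====

-- folding the identity
theorem pv_foldl_id {α β : Type} (l : List α) (a : β) : l.foldl (fun r _ => r) a = a := by
  induction l generalizing a with
  | nil => rfl
  | cons x l ih => exact ih a

-- a conditional-insert fold does not touch keys outside the list
theorem pv_buildD_getD_not_mem (p : String → Prop) [DecidablePred p] (v : String → Int)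
    (k : String) (L : List String) (hk : k ∉ L) :
    ∀ d : PySem.Dict String Int,
      (L.foldl (fun r x => if p x then r.insert x (v x) else r) d).getD k 0 = d.getD k 0 := by
  induction L with
  | nil => intro d; rfl
  | cons x L ih =>
    intro d
    have hkx : k ≠ x := fun h => hk (h ▸ List.mem_cons_self)
    have hkL : k ∉ L := fun h => hk (List.mem_cons_of_mem _ h)
    simp only [List.foldl_cons]
    rw [ih hkL]
    split_ifs with hp
    · rw [PySem.Dict.getD_insert]; simp [hkx]
    · rfl

theorem pv_buildD_getD (p : String → Prop) [DecidablePred p] (v : String → Int)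
    (k : String) (L : List String) (hL : L.Nodup) :
    ∀ d : PySem.Dict String Int,
      (L.foldl (fun r x => if p x then r.insert x (v x) else r) d).getD k 0
        = if k ∈ L ∧ p k then v k else d.getD k 0 := by
  induction L with
  | nil => intro d; simp
  | cons x L ih =>
    intro d
    rcases List.nodup_cons.mp hL with ⟨hxL, hLnd⟩
    simp only [List.foldl_cons]
    by_cases hkx : k = x
    · subst hkx
      rw [pv_buildD_getD_not_mem p v k L hxL]
      by_cases hp : p k
      · simp [hp]
      · simp [hp]
    · rw [ih hLnd]
      have hmem : (k ∈ x :: L ∧ p k) ↔ (k ∈ L ∧ p k) := by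
        constructor
        · rintro ⟨hm, hp⟩; exact ⟨(List.mem_cons.mp hm).resolve_left hkx, hp⟩
        · rintro ⟨hm, hp⟩; exact ⟨List.mem_cons_of_mem _ hm, hp⟩
      by_cases h : k ∈ L ∧ p k
      · simp [h, hmem.symm.mp h]
      · have h' : ¬ (k ∈ x :: L ∧ p k) := fun hc => h (hmem.mp hc)
        rw [if_neg h, if_neg h']
        by_cases hp : p x
        · simp [hp, PySem.Dict.getD_insert, hkx]
        · simp [hp]

theorem pv_buildD_keys (p : String → Prop) [DecidablePred p] (v : String → Int)
    (L : List String) (hL : L.Nodup) :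
    ∀ d : PySem.Dict String Int, (∀ x ∈ L, d.contains x = false) →
      (L.foldl (fun r x => if p x then r.insert x (v x) else r) d).keys
        = d.keys ++ L.filter (fun x => decide (p x)) := by
  induction L with
  | nil => intro d _; simp
  | cons x L ih =>
    intro d hd
    rcases List.nodup_cons.mp hL with ⟨hxL, hLnd⟩
    simp only [List.foldl_cons]
    split_ifs with hp
    · rw [ih hLnd _ ?_, PySem.Dict.keys_insert_of_not_contains d (v x) (hd x List.mem_cons_self)]
      · simp [hp]
      · intro y hy
        have hyx : y ≠ x := fun h => hxL (h ▸ hy)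
        rw [PySem.Dict.contains_insert]
        simp [hyx, hd y (List.mem_cons_of_mem _ hy)]
    · rw [ih hLnd _ (fun y hy => hd y (List.mem_cons_of_mem _ hy))]
      simp [hp]

-- characterisation of Counter subtraction of two counters
theorem pv_counterSub_eq (xs ys : List String) :
    pyCounterSub (PySem.Dict.counter xs) (PySem.Dict.counter ys)
      = List.foldl
          (fun r x => if 0 < (List.count x xs : Int) - List.count x ys
                      then r.insert x ((List.count x xs : Int) - List.count x ys) else r)
          PySem.Dict.empty (PySem.Set.ofList xs) := by
  simp only [pyCounterSub, PySem.Dict.items_counter, List.foldl_map, PySem.Dict.getD_counter]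
  rw [PySem.List.foldl_congr_mem (PySem.Set.ofList ys) _ (fun r _ => r) _ ?_, pv_foldl_id]
  intro acc x hx
  have hy : ¬ ((List.count x ys : Int) < 0) := by omega
  simp [hy]

theorem pv_sub_getD (xs ys : List String) (k : String) :
    (pyCounterSub (PySem.Dict.counter xs) (PySem.Dict.counter ys)).getD k 0
      = if (List.count k ys : Int) < List.count k xs
        then (List.count k xs : Int) - List.count k ys else 0 := by
  rw [pv_counterSub_eq]
  have h := pv_buildD_getD (fun x => 0 < (List.count x xs : Int) - List.count x ys)
      (fun x => (List.count x xs : Int) - List.count x ys) k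
      (PySem.Set.ofList xs) (PySem.Set.nodup_ofList xs) PySem.Dict.empty
  rw [h, PySem.Dict.getD_empty]
  by_cases hlt : (List.count k ys : Int) < List.count k xs
  · have hk : k ∈ xs := by
      have : 0 < List.count k xs := by omega
      exact List.count_pos_iff.mp this
    have hmem : k ∈ PySem.Set.ofList xs := (PySem.Set.mem_ofList xs k).mpr hk
    rw [if_pos ⟨hmem, by omega⟩, if_pos hlt]
  · rw [if_neg (by rintro ⟨-, h0⟩; omega), if_neg hlt]

theorem pv_sub_keys (xs ys : List String) :
    (pyCounterSub (PySem.Dict.counter xs) (PySem.Dict.counter ys)).keys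
      = (PySem.Set.ofList xs).filter
          (fun k => decide ((List.count k ys : Int) < List.count k xs)) := by
  rw [pv_counterSub_eq]
  have h := pv_buildD_keys (fun x => 0 < (List.count x xs : Int) - List.count x ys)
      (fun x => (List.count x xs : Int) - List.count x ys)
      (PySem.Set.ofList xs) (PySem.Set.nodup_ofList xs) PySem.Dict.empty
      (fun x _ => PySem.Dict.contains_empty x)
  rw [h, PySem.Dict.keys_empty, List.nil_append]
  apply List.filter_congr
  intro x _
  simp only [decide_eq_decide]
  omega

-- ===== B-side lemmas =====
theorem pvMerge_sublist : ∀ (n : Nat) (xs ys : List String),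
    List.Sublist (pvMerge n xs ys).1 xs ∧ List.Sublist (pvMerge n xs ys).2 ys := by
  intro n
  induction n with
  | zero => intro xs ys; exact ⟨List.Sublist.refl xs, List.Sublist.refl ys⟩
  | succ n ih =>
    intro xs ys
    match xs, ys with
    | [], ys => exact ⟨List.Sublist.refl [], List.Sublist.refl ys⟩
    | x :: xs, [] => exact ⟨List.Sublist.refl _, List.Sublist.refl []⟩
    | a :: xs, b :: ys =>
      by_cases hab : a = b
      · rw [show pvMerge (n+1) (a::xs) (b::ys) = pvMerge n xs ys from by
          simp [pvMerge, hab]]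
        exact ⟨(ih xs ys).1.cons a, (ih xs ys).2.cons b⟩
      · by_cases hlt : a < b
        · rw [show pvMerge (n+1) (a::xs) (b::ys)
              = (a :: (pvMerge n xs (b::ys)).1, (pvMerge n xs (b::ys)).2) from by
            simp [pvMerge, hab, hlt]]
          exact ⟨(ih xs (b :: ys)).1.cons₂ a, (ih xs (b :: ys)).2⟩
        · rw [show pvMerge (n+1) (a::xs) (b::ys)
              = ((pvMerge n (a::xs) ys).1, b :: (pvMerge n (a::xs) ys).2) from by
            simp [pvMerge, hab, hlt]]
          exact ⟨(ih (a :: xs) ys).1, (ih (a :: xs) ys).2.cons₂ b⟩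

theorem pvMerge_count : ∀ (n : Nat) (xs ys : List String),
    xs.length + ys.length ≤ n → xs.Pairwise (· ≤ ·) → ys.Pairwise (· ≤ ·) → ∀ k,
    (pvMerge n xs ys).1.count k = xs.count k - ys.count k ∧
    (pvMerge n xs ys).2.count k = ys.count k - xs.count k := by
  intro n
  induction n with
  | zero =>
    intro xs ys hlen _ _ k
    have hx : xs = [] := List.length_eq_zero_iff.mp (by omega)
    have hy : ys = [] := List.length_eq_zero_iff.mp (by omega)
    subst hx; subst hy
    simp [pvMerge]
  | succ n ih =>
    intro xs ys hlen hxs hys k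
    match xs, ys with
    | [], ys => simp [pvMerge]
    | x :: xs, [] => simp [pvMerge]
    | a :: xs, b :: ys =>
      rcases List.pairwise_cons.mp hxs with ⟨ha, hxs'⟩
      rcases List.pairwise_cons.mp hys with ⟨hb, hys'⟩
      simp only [List.length_cons] at hlen
      by_cases hab : a = b
      · subst hab
        rw [show pvMerge (n+1) (a::xs) (a::ys) = pvMerge n xs ys from by simp [pvMerge]]
        have h := ih xs ys (by omega) hxs' hys' k
        rw [h.1, h.2, List.count_cons, List.count_cons]
        constructor <;> split_ifs <;> omega
      · by_cases hlt : a < b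
        · rw [show pvMerge (n+1) (a::xs) (b::ys)
              = (a :: (pvMerge n xs (b::ys)).1, (pvMerge n xs (b::ys)).2) from by
            simp [pvMerge, hab, hlt]]
          have h := ih xs (b :: ys) (by simp only [List.length_cons]; omega) hxs' hys k
          have hay : (b :: ys).count a = 0 := by
            apply List.count_eq_zero.mpr
            intro hmem
            rcases List.mem_cons.mp hmem with h' | h'
            · exact hab h'
            · exact absurd (lt_of_lt_of_le hlt (hb a h')) (lt_irrefl a)
          by_cases hk : a = k
          · subst hk
            rw [hay] at h ⊢
            simp only [List.count_cons_self, h.1, h.2]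
            omega
          · obtain ⟨h1, h2⟩ := h
            by_cases hbk : b = k
            · subst hbk
              simp only [List.count_cons, beq_iff_eq, hk, if_false] at h1 h2 ⊢
              omega
            · simp only [List.count_cons, beq_iff_eq, hk, hbk, if_false] at h1 h2 ⊢
              omega
        · have hba : b < a := lt_of_le_of_ne (not_lt.mp hlt) (fun h' => hab h'.symm)
          rw [show pvMerge (n+1) (a::xs) (b::ys)
              = ((pvMerge n (a::xs) ys).1, b :: (pvMerge n (a::xs) ys).2) from by
            simp [pvMerge, hab, hlt]]
          have h := ih (a :: xs) ys (by simp only [List.length_cons]; omega) hxs hys' k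
          have hbx : (a :: xs).count b = 0 := by
            apply List.count_eq_zero.mpr
            intro hmem
            rcases List.mem_cons.mp hmem with h' | h'
            · exact hab h'.symm
            · exact absurd (lt_of_lt_of_le hba (ha b h')) (lt_irrefl b)
          by_cases hk : b = k
          · subst hk
            rw [hbx] at h ⊢
            simp only [List.count_cons_self, h.1, h.2]
            omega
          · obtain ⟨h1, h2⟩ := h
            by_cases hak : a = k
            · subst hak
              simp only [List.count_cons, beq_iff_eq, hk, if_false] at h1 h2 ⊢
              omega
            · simp only [List.count_cons, beq_iff_eq, hk, hak, if_false] at h1 h2 ⊢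
              omega
-- the distinct keys of a sorted run-length pass, in order (proof-side mirror of pvExpandGo)
def pvKeysGo (cur : String) : List String → List String
  | [] => [cur]
  | x :: rest => if x = cur then pvKeysGo cur rest else cur :: pvKeysGo x rest

def pvKeys : List String → List String
  | [] => []
  | a :: rest => pvKeysGo a rest

theorem pvKeysGo_mem (k cur : String) : ∀ rest, k ∈ pvKeysGo cur rest → k = cur ∨ k ∈ rest := by
  intro rest
  induction rest generalizing cur with
  | nil => intro h; simp [pvKeysGo] at h; exact Or.inl h
  | cons x rs ih =>
    intro h
    simp only [pvKeysGo] at h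
    split_ifs at h with hx
    · rcases ih cur h with h' | h'
      · exact Or.inl h'
      · exact Or.inr (List.mem_cons_of_mem _ h')
    · rcases List.mem_cons.mp h with h' | h'
      · exact Or.inl h'
      · rcases ih x h' with h'' | h''
        · exact Or.inr (h'' ▸ List.mem_cons_self)
        · exact Or.inr (List.mem_cons_of_mem _ h'')

theorem mem_pvKeysGo (k cur : String) : ∀ rest, k ∈ cur :: rest → k ∈ pvKeysGo cur rest := by
  intro rest
  induction rest generalizing cur with
  | nil => intro h; simpa [pvKeysGo] using h
  | cons x rs ih =>
    intro h
    simp only [pvKeysGo]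
    split_ifs with hx
    · subst hx
      apply ih
      rcases List.mem_cons.mp h with h' | h'
      · exact h' ▸ List.mem_cons_self
      · exact h'
    · rcases List.mem_cons.mp h with h' | h'
      · exact h' ▸ List.mem_cons_self
      · exact List.mem_cons_of_mem _ (ih x h')

theorem pvKeysGo_pairwise (cur : String) : ∀ rest, (∀ x ∈ rest, cur ≤ x) →
    rest.Pairwise (· ≤ ·) → (pvKeysGo cur rest).Pairwise (· < ·) := by
  intro rest
  induction rest generalizing cur with
  | nil => intro _ _; simp [pvKeysGo]
  | cons x rs ih =>
    intro h1 h2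
    rcases List.pairwise_cons.mp h2 with ⟨hx, h2'⟩
    simp only [pvKeysGo]
    split_ifs with hxc
    · subst hxc
      exact ih x (fun y hy => hx y hy) h2'
    · have hcx : cur < x := lt_of_le_of_ne (h1 x List.mem_cons_self) (fun h => hxc h.symm)
      refine List.pairwise_cons.mpr ⟨?_, ih x hx h2'⟩
      intro y hy
      rcases pvKeysGo_mem y x rs hy with h' | h'
      · exact h' ▸ hcx
      · exact lt_of_lt_of_le hcx (hx y h')

-- the run-length pass, characterised as a flatMap over the distinct keys
theorem pvExpandGo_eq (mp : PySem.Dict String (List String)) :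
    ∀ (rest : List String) (cur : String) (cnt : Nat), (∀ x ∈ rest, cur ≤ x) →
    rest.Pairwise (· ≤ ·) →
    pvExpandGo mp cur cnt rest
      = (pvKeysGo cur rest).flatMap (fun k =>
          PySem.List.slice (mp.getD k [k]) none
            (some (((if k = cur then cnt else 0) + rest.count k : Nat) : Int))) := by
  intro rest
  induction rest with
  | nil =>
    intro cur cnt _ _
    simp [pvExpandGo, pvKeysGo]
  | cons x rs ih =>
    intro cur cnt h1 h2
    rcases List.pairwise_cons.mp h2 with ⟨hx, h2'⟩
    by_cases hxc : x = cur
    · subst hxc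
      simp only [pvExpandGo, pvKeysGo]
      rw [ih x (cnt + 1) (fun y hy => hx y hy) h2']
      apply List.flatMap_congr
      intro k hk
      congr 2
      rw [Nat.cast_inj]
      rw [List.count_cons]
      by_cases hkx : k = x
      · simp [hkx]
        omega
      · have hkx' : ¬ (x == k) = true := by simpa using fun h => hkx h.symm
        simp [hkx, hkx']
    · have hcx : cur < x := lt_of_le_of_ne (h1 x List.mem_cons_self) (fun h => hxc h.symm)
      have hcnt : (x :: rs).count cur = 0 := by
        apply List.count_eq_zero.mpr
        intro hmem
        rcases List.mem_cons.mp hmem with h' | h'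
        · exact hxc h'.symm
        · exact absurd (lt_of_lt_of_le hcx (hx cur h')) (lt_irrefl cur)
      simp only [pvExpandGo, if_neg hxc, pvKeysGo, List.flatMap_cons]
      rw [ih x 1 hx h2']
      congr 1
      · congr 2
        rw [Nat.cast_inj]
        simp [hcnt]
      · apply List.flatMap_congr
        intro k hk
        have hkcur : ¬ k = cur := by
          intro hc
          subst hc
          rcases pvKeysGo_mem k x rs hk with h' | h'
          · exact (ne_of_gt hcx) h'.symm
          · rw [List.count_cons] at hcnt
            exact List.count_eq_zero.mp (by omega : rs.count k = 0) h'
        congr 2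
        rw [Nat.cast_inj, List.count_cons]
        by_cases hkx : k = x
        · simp [hkx, hxc]
          omega
        · have hkx' : ¬ (x == k) = true := by simpa using fun h => hkx h.symm
          simp [hkx, hkcur, hkx']

theorem pvExpand_eq (mp : PySem.Dict String (List String)) (r : List String)
    (hr : r.Pairwise (· ≤ ·)) :
    pvExpand mp r = (pvKeys r).flatMap (fun k =>
      PySem.List.slice (mp.getD k [k]) none (some ((r.count k : Nat) : Int))) := by
  match r with
  | [] => simp [pvExpand, pvKeys]
  | a :: rest =>
    rcases List.pairwise_cons.mp hr with ⟨ha, hr'⟩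
    simp only [pvExpand, pvKeys]
    rw [pvExpandGo_eq mp rest a 1 ha hr']
    apply List.flatMap_congr
    intro k hk
    congr 2
    rw [Nat.cast_inj, List.count_cons]
    by_cases hka : k = a
    · simp [hka]
      omega
    · have hka' : ¬ (a == k) = true := by simpa using fun h => hka h.symm
      simp [hka, hka']
-- one side of the comparison: A's sorted Counter-difference loop equals B's expansion
-- of any sorted leftover list with the right multiplicities
theorem pv_side_eq (xs ys : List String) (mp : List (String × List String))
    (r : List String) (hr : r.Pairwise (· ≤ ·))
    (hc : ∀ k, r.count k = xs.count k - ys.count k) :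
    (PySem.List.sorted (pyCounterSub (PySem.Dict.counter xs) (PySem.Dict.counter ys)).keys (fun x => x)).foldl
      (fun acc norm => acc ++ PySem.List.slice ((PySem.Dict.mk mp).getD norm [norm]) none
        (some ((pyCounterSub (PySem.Dict.counter xs) (PySem.Dict.counter ys)).getD norm 0))) []
      = pvExpand (PySem.Dict.mk mp) r := by
  have hmemK : ∀ k, k ∈ pvKeys r ↔ k ∈ r := by
    intro k
    match r with
    | [] => simp [pvKeys]
    | a :: rest =>
      constructor
      · intro h
        rcases pvKeysGo_mem k a rest h with h' | h'
        · exact h' ▸ List.mem_cons_self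
        · exact List.mem_cons_of_mem _ h'
      · intro h
        exact mem_pvKeysGo k a rest h
  have hKpw : (pvKeys r).Pairwise (· < ·) := by
    match r with
    | [] => simp [pvKeys]
    | a :: rest =>
      rcases List.pairwise_cons.mp hr with ⟨ha, hr'⟩
      exact pvKeysGo_pairwise a rest ha hr'
  have hkeys : PySem.List.sorted (pyCounterSub (PySem.Dict.counter xs) (PySem.Dict.counter ys)).keys (fun x => x) = pvKeys r := by
    apply PySem.List.sorted_eq_of_perm_of_pairwise_lt
    · rw [List.perm_ext_iff_of_nodup hKpw.nodup ?nd2]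
      case nd2 =>
        rw [pv_sub_keys]
        exact (PySem.Set.nodup_ofList xs).filter _
      intro k
      rw [hmemK k, pv_sub_keys, List.mem_filter, PySem.Set.mem_ofList]
      constructor
      · intro h
        have h0 : 0 < r.count k := List.count_pos_iff.mpr h
        rw [hc k] at h0
        refine ⟨List.count_pos_iff.mp (by omega), ?_⟩
        simp only [decide_eq_true_eq]
        exact_mod_cast (by omega : ys.count k < xs.count k)
      · rintro ⟨hm, hlt⟩
        simp only [decide_eq_true_eq] at hlt
        apply List.count_pos_iff.mp
        rw [hc k]
        have : ys.count k < xs.count k := by exact_mod_cast hlt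
        omega
    · exact hKpw
  rw [PySem.List.foldl_append_eq_flatMap, List.nil_append, hkeys,
    pvExpand_eq (PySem.Dict.mk mp) r hr]
  apply List.flatMap_congr
  intro k hk
  have hmemr : k ∈ r := (hmemK k).mp hk
  have h0 : 0 < r.count k := List.count_pos_iff.mpr hmemr
  have hlt : ys.count k < xs.count k := by
    have := hc k
    omega
  congr 2
  rw [pv_sub_getD, if_pos (by exact_mod_cast hlt), hc k]
  rw [Nat.cast_sub (le_of_lt hlt)]

-- ===== VERDICT (by name: the statement is the Claim_ definition above) =====
theorem multiset_diff_spec : Claim_equal_multiset_diff := by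
  intro norm1 map1 norm2 map2 _
  unfold Spec_multiset_diff
  simp only [multiset_diff, multiset_diff_alt]
  have hs1 : (PySem.List.sorted norm1 (fun x => x)).Pairwise (· ≤ ·) :=
    PySem.List.sorted_pairwise norm1 (fun x => x)
  have hs2 : (PySem.List.sorted norm2 (fun x => x)).Pairwise (· ≤ ·) :=
    PySem.List.sorted_pairwise norm2 (fun x => x)
  have hm := pvMerge_count
    ((PySem.List.sorted norm1 (fun x => x)).length + (PySem.List.sorted norm2 (fun x => x)).length)
    (PySem.List.sorted norm1 (fun x => x)) (PySem.List.sorted norm2 (fun x => x))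
    (le_refl _) hs1 hs2
  have hsub := pvMerge_sublist
    ((PySem.List.sorted norm1 (fun x => x)).length + (PySem.List.sorted norm2 (fun x => x)).length)
    (PySem.List.sorted norm1 (fun x => x)) (PySem.List.sorted norm2 (fun x => x))
  have hcnt1 : ∀ k, (PySem.List.sorted norm1 (fun x => x)).count k = norm1.count k :=
    fun k => (PySem.List.sorted_perm norm1 (fun x => x) false).count_eq k
  have hcnt2 : ∀ k, (PySem.List.sorted norm2 (fun x => x)).count k = norm2.count k :=
    fun k => (PySem.List.sorted_perm norm2 (fun x => x) false).count_eq k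
  refine Prod.ext ?_ ?_
  · exact pv_side_eq norm1 norm2 map1 _ (hs1.sublist hsub.1)
      (fun k => by rw [(hm k).1, hcnt1 k, hcnt2 k])
  · exact pv_side_eq norm2 norm1 map2 _ (hs2.sublist hsub.2)
      (fun k => by rw [(hm k).2, hcnt1 k, hcnt2 k])
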